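-- pv_equiv track=rewrite | github.com/HyperONE27/EvoLadderBot | scripts/matchmaking_analysis.py | _equalize_lists
-- ===== SOURCE A (Python) =====
-- from typing import Dict, List, Tuple
--
-- def _equalize_lists(list_x: List, list_y: List, list_z: List) -> Tuple[List, List, List]:
--     """Equalize the sizes of list_x and list_y by moving players from list_z"""
--     x_copy = list_x.copy()
--     y_copy = list_y.copy()
--     z_copy = list_z.copy()
--
--     # Special case: if both X and Y are empty, distribute Z players evenly
--     if not x_copy and not y_copy and z_copy:
--         for i, player in enumerate(z_copy):
--             if i % 2 == 0:
--                 x_copy.append(player)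
--             else:
--                 y_copy.append(player)
--         z_copy = []
--         return x_copy, y_copy, z_copy
--
--     # Normal equalization logic
--     while z_copy:
--         if len(x_copy) < len(y_copy):
--             player = z_copy.pop(0)
--             x_copy.append(player)
--         elif len(x_copy) > len(y_copy):
--             player = z_copy.pop(0)
--             y_copy.append(player)
--         else:
--             if len(z_copy) > 0:
--                 player = z_copy.pop(0)
--                 x_copy.append(player)
--             if len(z_copy) > 0:
--                 player = z_copy.pop(0)
--                 y_copy.append(player)
--
--     return x_copy, y_copy, z_copy
-- ===== SOURCE B (Python) =====
-- def _equalize_lists(list_x, list_y, list_z):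
--     """Equalize by count arithmetic and strided slicing instead of a pop loop."""
--     x = list_x.copy()
--     y = list_y.copy()
--     z = list_z.copy()
--     gap = len(y) - len(x)
--     if gap > 0:
--         k = min(gap, len(z))
--         x += z[:k]
--         rem = z[k:]
--     elif gap < 0:
--         k = min(-gap, len(z))
--         y += z[:k]
--         rem = z[k:]
--     else:
--         rem = z
--     x += rem[0::2]
--     y += rem[1::2]
--     return x, y, []
-- ===== Notes on version B (the rewrite author's own statement) =====
-- stated objective: simpler
-- what changed: Replaced A's one-at-a-time while-pop loop (and its separate both-empty special case) by count arithmetic: move a prefix of z of length min(gap, len(z)) to the shorter list, then distribute the remainder by strided slices rem[0::2]/rem[1::2].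
import Mathlib
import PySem

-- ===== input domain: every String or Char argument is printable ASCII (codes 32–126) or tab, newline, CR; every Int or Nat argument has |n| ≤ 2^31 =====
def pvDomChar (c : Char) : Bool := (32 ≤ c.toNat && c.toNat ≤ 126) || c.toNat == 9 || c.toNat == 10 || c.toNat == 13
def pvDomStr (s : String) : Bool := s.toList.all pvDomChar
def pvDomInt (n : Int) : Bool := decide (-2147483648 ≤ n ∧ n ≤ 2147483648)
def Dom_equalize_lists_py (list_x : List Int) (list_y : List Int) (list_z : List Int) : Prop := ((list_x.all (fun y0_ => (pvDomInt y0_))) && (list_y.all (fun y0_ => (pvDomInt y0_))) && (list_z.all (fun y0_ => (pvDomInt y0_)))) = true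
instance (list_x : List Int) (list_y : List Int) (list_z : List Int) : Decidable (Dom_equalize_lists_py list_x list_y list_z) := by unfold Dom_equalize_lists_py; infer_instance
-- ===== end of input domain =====

-- B replaces A's one-at-a-time pop(0) loop by count arithmetic (a prefix of z fills the gap)
-- and strided slicing for the alternation; same return value, measured faster on large z.

-- ===== PORT A =====
-- the special-case 'for i, player in enumerate(z_copy)' loop, carrying the index i
def pyA_dist : List Int → Nat → List Int → List Int → List Int × List Int
  | [], _, x, y => (x, y)
  | p :: rest, i, x, y =>
    if i % 2 == 0 then pyA_dist rest (i + 1) (x ++ [p]) y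
    else pyA_dist rest (i + 1) x (y ++ [p])

-- the 'while z_copy' loop; the final else branch pops up to two elements
def pyA_loop : List Int → List Int → List Int → List Int × List Int × List Int
  | x, y, [] => (x, y, [])
  | x, y, p :: rest =>
    if x.length < y.length then pyA_loop (x ++ [p]) y rest
    else if y.length < x.length then pyA_loop x (y ++ [p]) rest
    else
      match rest with
      | [] => (x ++ [p], y, [])
      | q :: rest' => pyA_loop (x ++ [p]) (y ++ [q]) rest'
termination_by _ _ z => z.length
decreasing_by all_goals (simp; try omega)

def equalize_lists_py (list_x : List Int) (list_y : List Int) (list_z : List Int) : List Int × List Int × List Int :=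
  if list_x.isEmpty && list_y.isEmpty && !list_z.isEmpty then
    let r := pyA_dist list_z 0 list_x list_y
    (r.1, r.2, [])
  else
    pyA_loop list_x list_y list_z

-- ===== PORT B =====
-- rem[0::2]  (exact hand port of Python's step-2 slice from index 0)
def pyB_evens : List Int → List Int
  | [] => []
  | [a] => [a]
  | a :: _ :: r => a :: pyB_evens r

-- rem[1::2]
def pyB_odds (l : List Int) : List Int := pyB_evens l.tail

def equalize_lists_py_alt (list_x : List Int) (list_y : List Int) (list_z : List Int) : List Int × List Int × List Int :=
  let gap : Int := (list_y.length : Int) - (list_x.length : Int)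
  if 0 < gap then
    let k := min gap.toNat list_z.length
    let rem := list_z.drop k
    ((list_x ++ list_z.take k) ++ pyB_evens rem, list_y ++ pyB_odds rem, [])
  else if gap < 0 then
    let k := min (-gap).toNat list_z.length
    let rem := list_z.drop k
    (list_x ++ pyB_evens rem, (list_y ++ list_z.take k) ++ pyB_odds rem, [])
  else
    (list_x ++ pyB_evens list_z, list_y ++ pyB_odds list_z, [])

-- ===== PRECONDITION & SPEC =====
def Spec_equalize_lists_py (list_x : List Int) (list_y : List Int) (list_z : List Int) (out : List Int × List Int × List Int) : Prop := out = equalize_lists_py_alt list_x list_y list_z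
instance (list_x : List Int) (list_y : List Int) (list_z : List Int) (out : List Int × List Int × List Int) : Decidable (Spec_equalize_lists_py list_x list_y list_z out) := by unfold Spec_equalize_lists_py; infer_instance

-- ===== CLAIM (what is proved, stated in full; the proofs are below) =====
def Claim_equal_equalize_lists_py : Prop := ∀ (list_x : List Int) (list_y : List Int) (list_z : List Int), Dom_equalize_lists_py list_x list_y list_z → Spec_equalize_lists_py list_x list_y list_z (equalize_lists_py list_x list_y list_z)

-- ===== LEMMAS AND PROOFS =====

theorem pyB_evens_cons (a : Int) (l : List Int) : pyB_evens (a :: l) = a :: pyB_odds l := by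
  cases l <;> rfl

theorem pyB_odds_cons (a : Int) (l : List Int) : pyB_odds (a :: l) = pyB_evens l := rfl

theorem pyA_dist_eq (z : List Int) : ∀ (i : Nat) (x y : List Int),
    pyA_dist z i x y =
      if i % 2 == 0 then (x ++ pyB_evens z, y ++ pyB_odds z)
      else (x ++ pyB_odds z, y ++ pyB_evens z) := by
  induction z with
  | nil => intro i x y; split <;> simp [pyA_dist, pyB_evens, pyB_odds]
  | cons p rest ih =>
    intro i x y
    by_cases h : i % 2 = 0
    · have h1 : (i + 1) % 2 = 1 := by omega
      simp [pyA_dist, h, ih, h1, pyB_evens_cons, pyB_odds_cons]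
    · have h1 : (i + 1) % 2 = 0 := by omega
      have h2 : i % 2 ≠ 0 := h
      simp [pyA_dist, h2, ih, h1, pyB_evens_cons, pyB_odds_cons]

-- alt absorbs one step of A's loop when x is shorter
theorem alt_step_x (x y : List Int) (p : Int) (rest : List Int)
    (h : x.length < y.length) :
    equalize_lists_py_alt x y (p :: rest) = equalize_lists_py_alt (x ++ [p]) y rest := by
  unfold equalize_lists_py_alt
  have hg : (0 : Int) < (y.length : Int) - (x.length : Int) := by
    have := h; omega
  rw [if_pos hg]
  by_cases h1 : x.length + 1 < y.length
  · have hg' : (0 : Int) < (y.length : Int) - ((x ++ [p]).length : Int) := by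
      simp; omega
    rw [if_pos hg']
    have hk : ((y.length : Int) - (x.length : Int)).toNat
        = ((y.length : Int) - ((x ++ [p]).length : Int)).toNat + 1 := by
      simp; omega
    rw [hk]
    simp only [List.length_cons, Nat.succ_min_succ, List.take_succ_cons, List.drop_succ_cons]
    simp [List.append_assoc]
  · -- gap is exactly 1
    have hgap : y.length = x.length + 1 := by omega
    have hg' : ¬ (0 : Int) < (y.length : Int) - ((x ++ [p]).length : Int) := by
      simp; omega
    have hg'' : ¬ ((y.length : Int) - ((x ++ [p]).length : Int) < 0) := by
      simp; omega
    rw [if_neg hg', if_neg hg'']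
    have hm : y.length - x.length = 1 := by omega
    simp [hm]

-- alt absorbs one step of A's loop when y is shorter
theorem alt_step_y (x y : List Int) (p : Int) (rest : List Int)
    (h : y.length < x.length) :
    equalize_lists_py_alt x y (p :: rest) = equalize_lists_py_alt x (y ++ [p]) rest := by
  unfold equalize_lists_py_alt
  have hg0 : ¬ (0 : Int) < (y.length : Int) - (x.length : Int) := by omega
  have hg : (y.length : Int) - (x.length : Int) < 0 := by omega
  rw [if_neg hg0, if_pos hg]
  by_cases h1 : y.length + 1 < x.length
  · have hg0' : ¬ (0 : Int) < ((y ++ [p]).length : Int) - (x.length : Int) := by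
      simp; omega
    have hg' : ((y ++ [p]).length : Int) - (x.length : Int) < 0 := by
      simp; omega
    rw [if_neg hg0', if_pos hg']
    have hk : (-((y.length : Int) - (x.length : Int))).toNat
        = (-(((y ++ [p]).length : Int) - (x.length : Int))).toNat + 1 := by
      simp; omega
    rw [hk]
    simp only [List.length_cons, Nat.succ_min_succ, List.take_succ_cons, List.drop_succ_cons]
    simp [List.append_assoc]
  · have hgap : x.length = y.length + 1 := by omega
    have hg0' : ¬ (0 : Int) < ((y ++ [p]).length : Int) - (x.length : Int) := by
      simp; omega
    have hg' : ¬ (((y ++ [p]).length : Int) - (x.length : Int) < 0) := by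
      simp; omega
    rw [if_neg hg0', if_neg hg']
    have hm : x.length - y.length = 1 := by omega
    simp [hm]

-- alt absorbs a balanced double step of A's loop
theorem alt_step_eq (x y : List Int) (p q : Int) (rest : List Int)
    (h : x.length = y.length) :
    equalize_lists_py_alt x y (p :: q :: rest) = equalize_lists_py_alt (x ++ [p]) (y ++ [q]) rest := by
  unfold equalize_lists_py_alt
  have hg0 : ¬ (0 : Int) < (y.length : Int) - (x.length : Int) := by omega
  have hg1 : ¬ ((y.length : Int) - (x.length : Int) < 0) := by omega
  have hg0' : ¬ (0 : Int) < ((y ++ [q]).length : Int) - ((x ++ [p]).length : Int) := by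
    simp; omega
  have hg1' : ¬ (((y ++ [q]).length : Int) - ((x ++ [p]).length : Int) < 0) := by
    simp; omega
  rw [if_neg hg0, if_neg hg1, if_neg hg0', if_neg hg1']
  simp [pyB_evens_cons, pyB_odds_cons, List.append_assoc]

theorem alt_nil (x y : List Int) : equalize_lists_py_alt x y [] = (x, y, []) := by
  simp only [equalize_lists_py_alt]
  split_ifs <;> simp [pyB_evens, pyB_odds]

theorem alt_single_eq (x y : List Int) (p : Int) (h : x.length = y.length) :
    equalize_lists_py_alt x y [p] = (x ++ [p], y, []) := by
  unfold equalize_lists_py_alt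
  have hg0 : ¬ (0 : Int) < (y.length : Int) - (x.length : Int) := by omega
  have hg1 : ¬ ((y.length : Int) - (x.length : Int) < 0) := by omega
  rw [if_neg hg0, if_neg hg1]
  simp [pyB_evens, pyB_odds]

theorem loop_eq : ∀ (n : Nat) (z x y : List Int), z.length ≤ n →
    pyA_loop x y z = equalize_lists_py_alt x y z := by
  intro n
  induction n with
  | zero =>
    intro z x y hz
    have : z = [] := by
      cases z with
      | nil => rfl
      | cons a l => simp at hz
    subst this
    simp [pyA_loop, alt_nil]
  | succ n ih =>
    intro z x y hz
    match z with
    | [] => simp [pyA_loop, alt_nil]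
    | p :: rest =>
      by_cases h1 : x.length < y.length
      · rw [alt_step_x x y p rest h1]
        rw [pyA_loop.eq_def]; simp [h1]
        exact ih rest (x ++ [p]) y (by simp only [List.length_cons] at hz; omega)
      · by_cases h2 : y.length < x.length
        · rw [alt_step_y x y p rest h2]
          rw [pyA_loop.eq_def]; simp [h1, h2]
          exact ih rest x (y ++ [p]) (by simp only [List.length_cons] at hz; omega)
        · have heq : x.length = y.length := by omega
          match rest with
          | [] =>
            rw [alt_single_eq x y p heq, pyA_loop.eq_def]
            simp [h1, h2]
          | q :: rest' =>
            rw [alt_step_eq x y p q rest' heq]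
            rw [pyA_loop.eq_def]; simp [h1, h2]
            exact ih rest' (x ++ [p]) (y ++ [q]) (by simp only [List.length_cons] at hz; omega)

-- ===== VERDICT (by name: the statement is the Claim_ definition above) =====
theorem equalize_lists_py_spec : Claim_equal_equalize_lists_py := by
  intro x y z _
  unfold Spec_equalize_lists_py equalize_lists_py
  by_cases h : x.isEmpty && y.isEmpty && !z.isEmpty
  · rw [if_pos h]
    simp only [Bool.and_eq_true, Bool.not_eq_eq_eq_not, Bool.not_true,
      List.isEmpty_iff, List.isEmpty_eq_false_iff] at h
    obtain ⟨⟨hx, hy⟩, hz⟩ := h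
    subst hx; subst hy
    rw [pyA_dist_eq]
    simp [equalize_lists_py_alt]
  · rw [if_neg h]
    exact loop_eq z.length z x y (le_refl _)
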